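-- pv_equiv track=rewrite | github.com/KFCatalan/qbb2019-answers | Spring2020/week2_0214/week2_1.py | sigma
-- ===== SOURCE A (Python) =====
-- def sigma(nt_s, nt_t):
--   # HoxD70 matrix of Chiaromonte, Yap, Miller 2002,
--   #                   A     C     G     T
--   sigma_score = [ [   91, -114,  -31, -123 ],
--                   [ -114,  100, -125,  -31 ],
--                   [  -31, -125,  100, -114 ],
--                   [ -123,  -31, -114,   91 ] ]
--   nucleotide = ["A","C","G","T"]
--   nts = nt_s, nt_t
--   for nt1 in enumerate(nucleotide):
--     for nt2 in enumerate(nucleotide):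
--       indx = nt1[0],nt2[0]
--       nt_pair = nt1[1],nt2[1]
--       if nts != nt_pair:
--         continue
--       elif nts == nt_pair:
--         pos = indx
--         score = sigma_score[pos[0]][pos[1]]
--         return score
-- ===== SOURCE B (Python) =====
-- # HoxD70 without any table: map each nucleotide to its index in A,C,G,T order and
-- # compute the score arithmetically from the index pair, exploiting the matrix's
-- # symmetry (equal pair, transition |i-j|==2, and the three transversion cases).
-- def sigma(nt_s, nt_t):
--     try:
--         i = ["A", "C", "G", "T"].index(nt_s)
--         j = ["A", "C", "G", "T"].index(nt_t)
--     except ValueError: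
--         return None
--     d = abs(i - j)
--     if d == 0:
--         return 91 if i % 3 == 0 else 100   # A/A,T/T vs C/C,G/G match
--     if d == 2:
--         return -31                          # transition (A<->G, C<->T)
--     if d == 3:
--         return -123                         # A<->T transversion
--     return -114 if min(i, j) % 2 == 0 else -125  # remaining transversions
-- ===== Notes on version B (the rewrite author's own statement) =====
-- stated objective: alternative
-- what changed: Replaced the nested 16-pair scan over the stored matrix with a table-free arithmetic computation: look up each nucleotide's index in ACGT order and derive the score from the index pair's distance and parity (match/transition/transversion cases), returning None when either index lookup fails.
import Mathlib
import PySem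

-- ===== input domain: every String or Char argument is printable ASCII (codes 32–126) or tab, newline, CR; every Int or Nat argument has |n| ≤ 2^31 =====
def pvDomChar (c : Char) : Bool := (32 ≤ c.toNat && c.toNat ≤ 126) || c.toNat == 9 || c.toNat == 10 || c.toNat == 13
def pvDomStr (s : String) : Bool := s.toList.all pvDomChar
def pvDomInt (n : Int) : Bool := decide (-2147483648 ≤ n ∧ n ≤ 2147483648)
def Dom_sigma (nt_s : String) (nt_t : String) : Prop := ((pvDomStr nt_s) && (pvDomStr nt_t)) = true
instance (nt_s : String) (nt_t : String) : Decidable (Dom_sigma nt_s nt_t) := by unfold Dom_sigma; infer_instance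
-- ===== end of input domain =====

-- B drops the stored matrix entirely: indices in ACGT order plus a short arithmetic case analysis (objective: alternative).

-- ===== PORT A =====
-- literal transliteration: nested for-loops over enumerate(nucleotide) with early return
def sigma (nt_s : String) (nt_t : String) : Option Int :=
  let sigma_score : List (List Int) :=
    [ [   91, -114,  -31, -123 ],
      [ -114,  100, -125,  -31 ],
      [  -31, -125,  100, -114 ],
      [ -123,  -31, -114,   91 ] ]
  let nucleotide : List String := ["A", "C", "G", "T"]
  let nts := (nt_s, nt_t)
  (PySem.List.enumerate nucleotide).findSome? (fun nt1 =>
    (PySem.List.enumerate nucleotide).findSome? (fun nt2 =>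
      let indx := (nt1.1, nt2.1)
      let nt_pair := (nt1.2, nt2.2)
      if nts ≠ nt_pair then none          -- continue
      else if nts = nt_pair then
        let pos := indx
        -- score = sigma_score[pos[0]][pos[1]]; indices are 0..3 so always in range
        (PySem.List.pyGet? sigma_score pos.1).bind (fun row => PySem.List.pyGet? row pos.2)
      else none))

-- ===== PORT B =====
-- try/except ValueError around the two .index calls → a match on the two Option indices
def sigma_alt (nt_s : String) (nt_t : String) : Option Int :=
  match PySem.List.index? ["A", "C", "G", "T"] nt_s,
        PySem.List.index? ["A", "C", "G", "T"] nt_t with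
  | some i, some j =>
      let d : Nat := max i j - min i j    -- abs(i - j) on the Nat indices
      if d = 0 then some (if i % 3 = 0 then 91 else 100)
      else if d = 2 then some (-31)
      else if d = 3 then some (-123)
      else some (if min i j % 2 = 0 then -114 else -125)
  | _, _ => none

-- ===== PRECONDITION & SPEC =====
def Spec_sigma (nt_s : String) (nt_t : String) (out : Option Int) : Prop := out = sigma_alt nt_s nt_t
instance (nt_s : String) (nt_t : String) (out : Option Int) : Decidable (Spec_sigma nt_s nt_t out) := by unfold Spec_sigma; infer_instance

-- ===== CLAIM (what is proved, stated in full; the proofs are below) =====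
def Claim_equal_sigma : Prop := ∀ (nt_s : String) (nt_t : String), Dom_sigma nt_s nt_t → Spec_sigma nt_s nt_t (sigma nt_s nt_t)

-- ===== LEMMAS AND PROOFS =====

lemma sigma_none_s (s t : String) (h1 : s ≠ "A") (h2 : s ≠ "C") (h3 : s ≠ "G") (h4 : s ≠ "T") :
    sigma s t = none := by
  simp [sigma, PySem.List.enumerate, List.findSome?, Prod.ext_iff, h1, h2, h3, h4]

lemma sigma_none_t (s t : String) (h1 : t ≠ "A") (h2 : t ≠ "C") (h3 : t ≠ "G") (h4 : t ≠ "T") :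
    sigma s t = none := by
  simp [sigma, PySem.List.enumerate, List.findSome?, Prod.ext_iff, h1, h2, h3, h4]

lemma index?_ACGT_none (s : String) (h1 : s ≠ "A") (h2 : s ≠ "C") (h3 : s ≠ "G") (h4 : s ≠ "T") :
    PySem.List.index? ["A", "C", "G", "T"] s = none := by
  rw [PySem.List.index?_eq_none_iff]
  simp [h1, h2, h3, h4]

lemma sigma_alt_none_s (s t : String) (h1 : s ≠ "A") (h2 : s ≠ "C") (h3 : s ≠ "G") (h4 : s ≠ "T") :
    sigma_alt s t = none := by
  simp only [sigma_alt]
  rw [index?_ACGT_none s h1 h2 h3 h4]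

lemma sigma_alt_none_t (s t : String) (h1 : t ≠ "A") (h2 : t ≠ "C") (h3 : t ≠ "G") (h4 : t ≠ "T") :
    sigma_alt s t = none := by
  simp only [sigma_alt]
  rw [index?_ACGT_none t h1 h2 h3 h4]
  cases PySem.List.index? ["A", "C", "G", "T"] s <;> rfl

-- ===== VERDICT (by name: the statement is the Claim_ definition above) =====
theorem sigma_spec : Claim_equal_sigma := by
  intro nt_s nt_t _
  unfold Spec_sigma
  by_cases hs : nt_s = "A" ∨ nt_s = "C" ∨ nt_s = "G" ∨ nt_s = "T"
  · by_cases ht : nt_t = "A" ∨ nt_t = "C" ∨ nt_t = "G" ∨ nt_t = "T"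
    · rcases hs with h|h|h|h <;> rcases ht with h'|h'|h'|h' <;> subst h <;> subst h' <;> decide
    · push Not at ht
      rw [sigma_none_t _ _ ht.1 ht.2.1 ht.2.2.1 ht.2.2.2,
          sigma_alt_none_t _ _ ht.1 ht.2.1 ht.2.2.1 ht.2.2.2]
  · push Not at hs
    rw [sigma_none_s _ _ hs.1 hs.2.1 hs.2.2.1 hs.2.2.2,
        sigma_alt_none_s _ _ hs.1 hs.2.1 hs.2.2.1 hs.2.2.2]
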